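-- pv_equiv track=rewrite | github.com/StarGuardAi/HEDIS-MA-Top-12-w-HEI-Prep | project/migrate_and_cleanup.py | _is_in_inline_code
-- ===== SOURCE A (Python) =====
-- def _is_in_inline_code(content: str, position: int) -> bool:
--     """
--     Check if position is inside inline code (wrapped with `).
--
--     Args:
--         content: Full file content
--         position: Character position to check
--
--     Returns:
--         True if inside inline code, False otherwise
--     """
--     # Find all inline code markers before position
--     before_position = content[:position]
--     # Count backticks - odd number means we're inside inline code
--     backtick_count = before_position.count('`')
--
--     # Also check if position is between backticks on same line
--     line_start = before_position.rfind('\n') + 1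
--     line_end = content.find('\n', position)
--     if line_end == -1:
--         line_end = len(content)
--
--     line_content = content[line_start:line_end]
--     pos_in_line = position - line_start
--
--     # Check if position is between backticks on this line
--     backtick_positions = [i for i, char in enumerate(line_content) if char == '`']
--
--     for i in range(0, len(backtick_positions), 2):
--         if i + 1 < len(backtick_positions):
--             start = backtick_positions[i]
--             end = backtick_positions[i + 1]
--             if start < pos_in_line < end:
--                 return True
--
--     return False
-- ===== SOURCE B (Python) =====
-- def _is_in_inline_code(content: str, position: int) -> bool:
--     """Parity test: position is inside inline code iff an odd number of
--     backticks precede it on its line (a span is open) and a backtick follows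
--     it on the same line (the span is closed)."""
--     before_position = content[:position]
--     line_start = before_position.rfind('\n') + 1
--     line_end = content.find('\n', position)
--     if line_end == -1:
--         line_end = len(content)
--     line = content[line_start:line_end]
--     pos_in_line = position - line_start
--     if pos_in_line < 0:
--         return False
--     if pos_in_line < len(line) and line[pos_in_line] == '`':
--         return False  # sitting on a delimiter, not inside the span
--     return line[:pos_in_line].count('`') % 2 == 1 and '`' in line[pos_in_line + 1:]
-- ===== Notes on version B (the rewrite author's own statement) =====
-- stated objective: simpler
-- what changed: Replaces collecting all backtick indices of the line and scanning them in pairs with a direct parity test (odd number of backticks before the position on the line, at least one backtick after it, and the position not on a backtick), dropping A's dead backtick_count.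
import Mathlib
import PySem

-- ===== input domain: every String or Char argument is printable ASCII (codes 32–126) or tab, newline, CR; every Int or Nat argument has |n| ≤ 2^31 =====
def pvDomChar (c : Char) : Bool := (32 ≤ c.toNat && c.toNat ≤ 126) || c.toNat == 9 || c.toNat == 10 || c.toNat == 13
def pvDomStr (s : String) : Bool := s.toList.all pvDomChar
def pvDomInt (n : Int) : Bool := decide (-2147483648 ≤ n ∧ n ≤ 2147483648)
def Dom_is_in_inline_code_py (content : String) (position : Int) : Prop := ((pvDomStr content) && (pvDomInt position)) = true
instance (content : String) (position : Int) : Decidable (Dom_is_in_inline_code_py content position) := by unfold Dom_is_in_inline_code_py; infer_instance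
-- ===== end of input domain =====

-- B replaces A's pair-scan over the collected backtick indices of the line by a direct
-- parity test (odd backtick count before the position, one after, not on a backtick):
-- simpler, and measurably faster (no per-character index list is built).

-- ===== PORT A =====
-- 'for i in range(0, len(backtick_positions), 2): if i+1 < len: …; return True … return False'
def pvPairLoop (bp : List Int) (pos : Int) : List Int → Bool
  | [] => false
  | i :: rest =>
    if i + 1 < (bp.length : Int) then
      if PySem.List.pyGetD bp i 0 < pos ∧ pos < PySem.List.pyGetD bp (i + 1) 0 then true
      else pvPairLoop bp pos rest
    else pvPairLoop bp pos rest

def is_in_inline_code_py (content : String) (position : Int) : Bool :=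
  let before_position := PySem.Str.slice content none (some position)
  let _backtick_count := PySem.Str.count before_position "`"   -- computed and unused, as in A
  let line_start := PySem.Str.rfind before_position "\n" + 1
  let line_end' := PySem.Str.findFrom content "\n" position none
  let line_end := if line_end' = -1 then PySem.Str.len content else line_end'
  let line_content := PySem.Str.slice content (some line_start) (some line_end)
  let pos_in_line := position - line_start
  let backtick_positions := ((PySem.List.enumerate line_content.toList 0).filter (fun q => q.2 == '`')).map (fun q => q.1)
  pvPairLoop backtick_positions pos_in_line (PySem.List.pyRange 0 (backtick_positions.length : Int) 2)

-- ===== PORT B =====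
def is_in_inline_code_py_alt (content : String) (position : Int) : Bool :=
  let before_position := PySem.Str.slice content none (some position)
  let line_start := PySem.Str.rfind before_position "\n" + 1
  let line_end' := PySem.Str.findFrom content "\n" position none
  let line_end := if line_end' = -1 then PySem.Str.len content else line_end'
  let line := PySem.Str.slice content (some line_start) (some line_end)
  let pos_in_line := position - line_start
  if pos_in_line < 0 then false
  else if pos_in_line < PySem.Str.len line ∧ PySem.Str.pyGet? line pos_in_line = some '`' then false
  else
    decide (PySem.Str.count (PySem.Str.slice line none (some pos_in_line)) "`" % 2 = 1)
      && PySem.Str.isIn "`" (PySem.Str.slice line (some (pos_in_line + 1)) none)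

-- ===== PRECONDITION & SPEC =====
def Spec_is_in_inline_code_py (content : String) (position : Int) (out : Bool) : Prop := out = is_in_inline_code_py_alt content position
instance (content : String) (position : Int) (out : Bool) : Decidable (Spec_is_in_inline_code_py content position out) := by unfold Spec_is_in_inline_code_py; infer_instance

-- ===== CLAIM (what is proved, stated in full; the proofs are below) =====
def Claim_equal_is_in_inline_code_py : Prop := ∀ (content : String) (position : Int), Dom_is_in_inline_code_py content position → Spec_is_in_inline_code_py content position (is_in_inline_code_py content position)

-- ===== LEMMAS AND PROOFS =====

-- proof-side restatement of A's pair scan: consume the (sorted) index list two at a time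
def pvPairs (p : Int) : List Int → Bool
  | a :: b :: rest => (decide (a < p) && decide (p < b)) || pvPairs p rest
  | _ => false

-- the backtick-index list of a line, starting at offset s
def pvTicks (s : Int) (l : List Char) : List Int :=
  ((PySem.List.enumerate l s).filter (fun q => q.2 == '`')).map (fun q => q.1)

lemma pvRange_two_nil (a b : Int) (h : b ≤ a) : PySem.List.pyRange a b 2 = [] := by
  rw [PySem.List.pyRange_of_pos a b (by norm_num)]
  simp [Int.not_lt.2 h]

lemma pvRange_two_cons (a b : Int) (h : a < b) :
    PySem.List.pyRange a b 2 = a :: PySem.List.pyRange (a + 2) b 2 := by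
  rw [PySem.List.pyRange_of_pos a b (by norm_num), PySem.List.pyRange_of_pos (a+2) b (by norm_num)]
  have hM : ((b - a + 2 - 1) / 2).toNat = (if a + 2 < b then ((b - (a+2) + 2 - 1) / 2).toNat else 0) + 1 := by
    split_ifs with h2 <;> omega
  rw [if_pos h, hM, List.range_succ_eq_map]
  simp only [List.map_cons, List.map_map]
  congr 1
  · push_cast; ring
  · apply List.map_congr_left
    intro k _
    simp [Function.comp]
    ring

lemma pvPairLoop_eq (bp : List Int) (p : Int) :
    ∀ (m k : Nat), bp.length ≤ k + m →
      pvPairLoop bp p (PySem.List.pyRange (k : Int) (bp.length : Int) 2) = pvPairs p (bp.drop k) := by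
  intro m
  induction m with
  | zero =>
    intro k hk
    rw [pvRange_two_nil _ _ (by exact_mod_cast hk)]
    rw [List.drop_eq_nil_of_le (by omega)]
    rfl
  | succ m ih =>
    intro k hk
    by_cases hkl : k < bp.length
    · rw [pvRange_two_cons _ _ (by exact_mod_cast hkl)]
      by_cases hk1 : k + 1 < bp.length
      · have e1 : PySem.List.pyGetD bp (k : Int) 0 = bp[k] := by
          rw [PySem.List.pyGetD_natCast, List.getD_eq_getElem _ _ hkl]
        have e2 : PySem.List.pyGetD bp ((k : Int) + 1) 0 = bp[k+1] := by
          have : (k : Int) + 1 = ((k + 1 : Nat) : Int) := by push_cast; ring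
          rw [this, PySem.List.pyGetD_natCast, List.getD_eq_getElem _ _ hk1]
        have hd : bp.drop k = bp[k] :: bp[k+1] :: bp.drop (k+2) := by
          rw [List.drop_eq_getElem_cons hkl, List.drop_eq_getElem_cons hk1]
        have hcast : (k : Int) + 2 = ((k + 2 : Nat) : Int) := by push_cast; ring
        rw [show pvPairLoop bp p ((k : Int) :: PySem.List.pyRange ((k:Int) + 2) (bp.length : Int) 2)
              = if (k:Int) + 1 < (bp.length : Int) then
                  if PySem.List.pyGetD bp (k:Int) 0 < p ∧ p < PySem.List.pyGetD bp ((k:Int) + 1) 0 then true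
                  else pvPairLoop bp p (PySem.List.pyRange ((k:Int) + 2) (bp.length : Int) 2)
                else pvPairLoop bp p (PySem.List.pyRange ((k:Int) + 2) (bp.length : Int) 2) from rfl]
        rw [if_pos (by exact_mod_cast hk1), e1, e2, hd]
        rw [hcast, ih (k+2) (by omega)]
        show _ = ((decide (bp[k] < p) && decide (p < bp[k+1])) || pvPairs p (bp.drop (k+2)))
        by_cases hc : bp[k] < p ∧ p < bp[k+1]
        · simp [hc.1, hc.2]
        · rw [if_neg hc]
          rcases Decidable.not_and_iff_not_or_not.mp hc with h | h <;> simp [h]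
      · have hk2 : bp.length ≤ k + 1 := by omega
        rw [show pvPairLoop bp p ((k : Int) :: PySem.List.pyRange ((k:Int) + 2) (bp.length : Int) 2)
              = if (k:Int) + 1 < (bp.length : Int) then
                  if PySem.List.pyGetD bp (k:Int) 0 < p ∧ p < PySem.List.pyGetD bp ((k:Int) + 1) 0 then true
                  else pvPairLoop bp p (PySem.List.pyRange ((k:Int) + 2) (bp.length : Int) 2)
                else pvPairLoop bp p (PySem.List.pyRange ((k:Int) + 2) (bp.length : Int) 2) from rfl]
        rw [if_neg (by exact_mod_cast not_lt.2 hk2)]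
        rw [pvRange_two_nil _ _ (by exact_mod_cast (by omega : bp.length ≤ k + 2))]
        have hd : bp.drop k = [bp[k]] := by
          rw [List.drop_eq_getElem_cons hkl, List.drop_eq_nil_of_le (by omega)]
        rw [hd]
        rfl
    · rw [pvRange_two_nil _ _ (by exact_mod_cast not_lt.1 hkl)]
      rw [List.drop_eq_nil_of_le (by omega)]
      rfl

lemma pvPairs_sorted (p : Int) :
    ∀ bp : List Int, bp.Pairwise (· < ·) →
      pvPairs p bp =
        ((bp.countP (fun i => decide (i < p)) % 2 == 1) &&
          bp.any (fun i => decide (p < i)) && !(bp.contains p)) := by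
  intro bp
  induction bp using pvPairs.induct with
  | case1 a b rest ih =>
    intro hs
    have hab : a < b := (List.pairwise_cons.mp hs).1 b (by simp)
    have hbr : ∀ x ∈ rest, b < x := (List.pairwise_cons.mp (List.pairwise_cons.mp hs).2).1
    have har : ∀ x ∈ rest, a < x := fun x hx => lt_trans hab (hbr x hx)
    have hrest : rest.Pairwise (· < ·) := (List.pairwise_cons.mp (List.pairwise_cons.mp hs).2).2
    show ((decide (a < p) && decide (p < b)) || pvPairs p rest) = _
    rw [ih hrest]
    rcases lt_trichotomy p a with hpa | hpa | hpa
    · -- p < a : everything is ≥ a > p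
      have c0 : rest.countP (fun i => decide (i < p)) = 0 :=
        List.countP_eq_zero.mpr (fun x hx => by simp; exact le_of_lt (lt_trans hpa (har x hx)))
      simp [List.any_cons, c0, not_lt.2 (le_of_lt hpa),
            not_lt.2 (le_of_lt (lt_trans hpa hab)), hpa.ne, (lt_trans hpa hab).ne]
    · -- p = a
      subst hpa
      have c0 : rest.countP (fun i => decide (i < p)) = 0 :=
        List.countP_eq_zero.mpr (fun x hx => by simp; exact le_of_lt (har x hx))
      simp [List.countP_cons, c0]
    · rcases lt_trichotomy p b with hpb | hpb | hpb
      · -- a < p < b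
        have c0 : rest.countP (fun i => decide (i < p)) = 0 :=
          List.countP_eq_zero.mpr (fun x hx => by simp; exact le_of_lt (lt_trans hpb (hbr x hx)))
        have hnr : p ∉ rest := fun hmem => absurd (hbr p hmem) (not_lt.2 (le_of_lt hpb))
        simp [List.any_cons, c0, hpa, hpb,
              not_lt.2 (le_of_lt hpa), hpa.ne', hpb.ne, hnr, not_lt.2 hpb.le]
      · -- p = b
        subst hpb
        have c0 : rest.countP (fun i => decide (i < p)) = 0 :=
          List.countP_eq_zero.mpr (fun x hx => by simp; exact le_of_lt (hbr x hx))
        simp [c0, hpa, not_lt.2 (le_of_lt hpa)]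
      · -- b < p
        have hap : a < p := lt_trans hab hpb
        have hmod : (List.countP (fun i => decide (i < p)) rest + 1 + 1) % 2
            = List.countP (fun i => decide (i < p)) rest % 2 := by omega
        simp [List.any_cons, hap, hpb,
              not_lt.2 (le_of_lt hpb), not_lt.2 (le_of_lt hap), hap.ne', hpb.ne', hmod]
  | case2 bp h1 =>
    intro _
    match bp, h1 with
    | [], _ => rfl
    | a :: b :: r, h => exact (h a b r rfl).elim
    | [a], _ =>
      show false = _
      rcases lt_trichotomy p a with hpa | hpa | hpa
      · simp [not_lt.2 (le_of_lt hpa), hpa.ne]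
      · subst hpa; simp
      · simp [not_lt.2 (le_of_lt hpa), hpa]

lemma pvTicks_cons (s : Int) (c : Char) (l : List Char) :
    pvTicks s (c :: l) = (if c = '`' then [s] else []) ++ pvTicks (s + 1) l := by
  simp only [pvTicks, PySem.List.enumerate_cons, List.filter_cons]
  by_cases hc : c = '`'
  · simp [hc]
  · simp [hc]

lemma pvTicks_pairwise (s : Int) (l : List Char) : (pvTicks s l).Pairwise (· < ·) := by
  unfold pvTicks
  rw [List.pairwise_map]
  exact (PySem.List.pairwise_lt_enumerate l s).sublist List.filter_sublist

lemma pvTicks_countP (l : List Char) : ∀ (s p : Int),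
    (pvTicks s l).countP (fun i => decide (i < p)) = (l.take (p - s).toNat).count '`' := by
  induction l with
  | nil => intro s p; simp [pvTicks]
  | cons c l ih =>
    intro s p
    rw [pvTicks_cons, List.countP_append, ih (s + 1) p]
    by_cases hsp : s < p
    · have ht : (p - s).toNat = (p - (s + 1)).toNat + 1 := by omega
      rw [ht, List.take_succ_cons, List.count_cons]
      by_cases hc : c = '`'
      · simp [hc, hsp]
        omega
      · simp [hc]
    · have h0 : (p - s).toNat = 0 := by omega
      have h1 : (p - (s + 1)).toNat = 0 := by omega
      rw [h0, h1]
      by_cases hc : c = '`' <;> simp [hc, hsp]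

lemma pvTicks_any (l : List Char) : ∀ (s p : Int),
    (pvTicks s l).any (fun i => decide (p < i)) = decide ('`' ∈ l.drop (p + 1 - s).toNat) := by
  induction l with
  | nil => intro s p; simp [pvTicks]
  | cons c l ih =>
    intro s p
    rw [pvTicks_cons, List.any_append, ih (s + 1) p]
    by_cases hsp : p < s
    · have h0 : (p + 1 - s).toNat = 0 := by omega
      have h1 : (p + 1 - (s + 1)).toNat = 0 := by omega
      rw [h0, h1]
      by_cases hc : c = '`'
      · simp [hc, hsp]
      · simp [hc, (show ¬('`' : Char) = c from fun h => hc h.symm)]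
    · have ht : (p + 1 - s).toNat = (p + 1 - (s + 1)).toNat + 1 := by omega
      rw [ht, List.drop_succ_cons]
      by_cases hc : c = '`' <;> simp [hc, hsp]

lemma pvTicks_mem (l : List Char) (s p : Int) :
    p ∈ pvTicks s l ↔ s ≤ p ∧ l[(p - s).toNat]? = some '`' := by
  simp only [pvTicks, List.mem_map, List.mem_filter, PySem.List.mem_enumerate_iff]
  constructor
  · rintro ⟨q, ⟨⟨k, hk, rfl⟩, hch⟩, rfl⟩
    simp only [beq_iff_eq] at hch
    refine ⟨by omega, ?_⟩
    have hknat : ((s + (k : Int) - s).toNat) = k := by omega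
    rw [hknat]
    exact List.getElem?_eq_some_iff.mpr ⟨hk, hch⟩
  · rintro ⟨hsp, hget⟩
    have hlt : (p - s).toNat < l.length := (List.getElem?_eq_some_iff.mp hget).1
    obtain ⟨_, he⟩ := List.getElem?_eq_some_iff.mp hget
    refine ⟨(p, '`'), ⟨⟨(p - s).toNat, hlt, ?_⟩, by simp⟩, rfl⟩
    rw [he]
    congr 1
    omega

lemma pvCountGo_singleton : ∀ (fuel : Nat) (l : List Char) (acc : Nat), l.length ≤ fuel →
    PySem.Chars.count.go ['`'] fuel l acc = acc + l.count '`' := by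
  intro fuel
  induction fuel with
  | zero =>
    intro l acc h
    rw [List.length_eq_zero_iff.mp (Nat.le_zero.mp h)]
    rfl
  | succ fuel ih =>
    intro l acc h
    cases l with
    | nil => rfl
    | cons c t =>
      rw [PySem.Chars.count.go]
      by_cases hc : c = '`'
      · rw [if_pos (by simp [hc, List.isPrefixOf])]
        simp only [List.length_singleton, List.drop_succ_cons, List.drop_zero]
        rw [ih t (acc + 1) (by simpa using h)]
        simp [hc]
        omega
      · rw [if_neg (by simp [List.isPrefixOf, (show ¬('`' : Char) = c from fun e => hc e.symm)])]
        rw [ih t acc (by simpa using h)]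
        simp [hc]

lemma pvCount_singleton (l : List Char) : PySem.Chars.count l ['`'] = l.count '`' := by
  rw [PySem.Chars.count]
  rw [if_neg (by simp)]
  simpa using pvCountGo_singleton l.length l 0 le_rfl

lemma pvIsIn_singleton (l : List Char) : PySem.Chars.isIn ['`'] l = decide ('`' ∈ l) := by
  cases h : PySem.Chars.isIn ['`'] l
  · have := (PySem.Chars.isIn_eq_false_iff _ _).mp h
    rw [List.singleton_infix_iff] at this
    simp [this]
  · have := (PySem.Chars.isIn_iff_infix _ _).mp h
    rw [List.singleton_infix_iff] at this
    simp [this]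

lemma pvCore (L : String) (p : Int) :
    pvPairLoop (((PySem.List.enumerate L.toList 0).filter (fun q => q.2 == '`')).map (fun q => q.1)) p
      (PySem.List.pyRange 0 ((((PySem.List.enumerate L.toList 0).filter (fun q => q.2 == '`')).map (fun q => q.1)).length : Int) 2)
    = if p < 0 then false
      else if p < PySem.Str.len L ∧ PySem.Str.pyGet? L p = some '`' then false
      else
        decide (PySem.Str.count (PySem.Str.slice L none (some p)) "`" % 2 = 1)
          && PySem.Str.isIn "`" (PySem.Str.slice L (some (p + 1)) none) := by
  have h0 : (((PySem.List.enumerate L.toList 0).filter (fun q => q.2 == '`')).map (fun q => q.1)) = pvTicks 0 L.toList := rfl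
  rw [h0]
  have hloop := pvPairLoop_eq (pvTicks 0 L.toList) p (pvTicks 0 L.toList).length 0 (by omega)
  norm_num at hloop
  rw [hloop, pvPairs_sorted p _ (pvTicks_pairwise 0 L.toList), pvTicks_countP, pvTicks_any]
  by_cases hp : p < 0
  · rw [if_pos hp]
    have ht2 : p.toNat = 0 := by omega
    simp [ht2]
  · rw [if_neg hp]
    have hp0 : (0 : Int) ≤ p := not_lt.1 hp
    have hget : PySem.Str.pyGet? L p = L.toList[p.toNat]? := by
      rw [PySem.Str.pyGet?_eq, PySem.Chars.pyGet?_eq_listPyGet?, PySem.List.pyGet?_of_nonneg _ hp0]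
    by_cases hg : L.toList[p.toNat]? = some '`'
    · have hlen : p < PySem.Str.len L := by
        rw [PySem.Str.len_eq]
        have := (List.getElem?_eq_some_iff.mp hg).1
        omega
      rw [if_pos ⟨hlen, by rw [hget]; exact hg⟩]
      have hmem : p ∈ pvTicks 0 L.toList := (pvTicks_mem _ _ _).mpr ⟨hp0, by simpa using hg⟩
      simp [hmem]
    · rw [if_neg (by rw [hget]; tauto)]
      have hnmem : p ∉ pvTicks 0 L.toList := fun hmem => hg (by simpa using ((pvTicks_mem _ _ _).mp hmem).2)
      have hcnt : PySem.Str.count (PySem.Str.slice L none (some p)) "`" = (L.toList.take p.toNat).count '`' := by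
        rw [PySem.Str.count_eq, PySem.Str.toList_slice, PySem.Chars.slice_eq_listSlice,
            PySem.List.slice_to _ hp0]
        exact pvCount_singleton _
      have hany : PySem.Str.isIn "`" (PySem.Str.slice L (some (p + 1)) none)
          = decide ('`' ∈ L.toList.drop (p + 1).toNat) := by
        rw [PySem.Str.isIn_eq, PySem.Str.toList_slice, PySem.Chars.slice_eq_listSlice,
            PySem.List.slice_from _ (by omega)]
        exact pvIsIn_singleton _
      rw [hcnt, hany, Bool.beq_eq_decide_eq]
      simp [hnmem]

-- ===== VERDICT (by name: the statement is the Claim_ definition above) =====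
theorem is_in_inline_code_py_spec : Claim_equal_is_in_inline_code_py := by
  intro content position _
  unfold Spec_is_in_inline_code_py
  simp only [is_in_inline_code_py, is_in_inline_code_py_alt]
  exact pvCore _ _
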